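-- pv_equiv track=rewrite | github.com/data4society/mpro-rp | mprorp/tests/test_mention.py | exist_overall_info
-- ===== SOURCE A (Python) =====
-- def exist_overall_info(spans_info):
--
--     # Определяет есть ли общая инфа для спанов из spans_info
--
--     all_span_info = []  # Общий список информации для всех спанов из spans_info
--     for span_info in spans_info:
--         for element_span_info in span_info:
--             if element_span_info not in all_span_info:
--                 all_span_info.append(element_span_info)
--
--     for element_all_span_info in all_span_info:
--         Flag = True
--         for span_info in spans_info:
--             if element_all_span_info not in span_info:
--                 Flag = False
--                 break
--         if Flag == True:
--             return True
--
--     return False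
-- ===== SOURCE B (Python) =====
-- def exist_overall_info(spans_info):
--     if not spans_info:
--         return False
--     common = set(spans_info[0])
--     for span in spans_info[1:]:
--         common &= set(span)
--     return bool(common)
-- ===== Notes on version B (the rewrite author's own statement) =====
-- stated objective: faster
-- what changed: Replaces A's build-union-then-rescan-every-span nested loops (with a quadratic list membership dedup) by a single fold intersecting a set with each span; the answer is whether the final intersection is nonempty.
import Mathlib
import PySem

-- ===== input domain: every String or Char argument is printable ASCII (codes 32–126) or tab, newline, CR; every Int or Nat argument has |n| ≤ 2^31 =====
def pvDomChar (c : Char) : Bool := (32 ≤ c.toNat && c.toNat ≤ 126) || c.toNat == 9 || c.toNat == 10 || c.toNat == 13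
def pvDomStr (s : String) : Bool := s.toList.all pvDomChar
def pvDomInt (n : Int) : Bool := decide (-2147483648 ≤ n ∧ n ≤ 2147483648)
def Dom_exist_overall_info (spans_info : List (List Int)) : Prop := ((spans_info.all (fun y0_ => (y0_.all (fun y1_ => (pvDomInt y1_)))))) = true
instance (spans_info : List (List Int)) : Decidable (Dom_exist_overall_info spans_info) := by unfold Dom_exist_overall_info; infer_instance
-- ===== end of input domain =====

-- B replaces A's union-then-rescan nested loops by one intersection fold over the spans; return value only, no mutation.

-- ===== PORT A =====
-- `all_span_info` dedup accumulation: `if e not in all: all.append(e)` is PySem.Set.add, so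
-- the inner loop over span_info is PySem.Set.update; the second phase (Flag loop with early
-- return True, else False) is `any` over the accumulated list of `all spans contain e`.
def exist_overall_info (spans_info : List (List Int)) : Bool :=
  let all_span_info : List Int :=
    spans_info.foldl (fun acc span_info => PySem.Set.update acc span_info) PySem.Set.empty
  all_span_info.any (fun e => spans_info.all (fun span_info => decide (e ∈ span_info)))

-- ===== PORT B =====
-- Source B: empty input → False; else fold set-intersection over the remaining spans, return bool(common).
def exist_overall_info_alt (spans_info : List (List Int)) : Bool :=
  match spans_info with
  | [] => false
  | s :: rest =>
      !((rest.foldl (fun common span => PySem.Set.inter common span) (PySem.Set.ofList s)).isEmpty)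

-- ===== PRECONDITION & SPEC =====
def Spec_exist_overall_info (spans_info : List (List Int)) (out : Bool) : Prop := out = exist_overall_info_alt spans_info
instance (spans_info : List (List Int)) (out : Bool) : Decidable (Spec_exist_overall_info spans_info out) := by unfold Spec_exist_overall_info; infer_instance

-- ===== CLAIM (what is proved, stated in full; the proofs are below) =====
def Claim_equal_exist_overall_info : Prop := ∀ (spans_info : List (List Int)), Dom_exist_overall_info spans_info → Spec_exist_overall_info spans_info (exist_overall_info spans_info)

-- ===== LEMMAS AND PROOFS =====

-- membership in A's accumulated union list
theorem mem_foldl_update (l : List (List Int)) (acc : List Int) (e : Int) :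
    e ∈ l.foldl (fun acc sp => PySem.Set.update acc sp) acc ↔ e ∈ acc ∨ ∃ sp ∈ l, e ∈ sp := by
  induction l generalizing acc with
  | nil => simp
  | cons s t ih =>
      simp only [List.foldl_cons, ih, PySem.Set.mem_update, List.mem_cons]
      constructor
      · rintro ((h | h) | ⟨sp, hsp, hm⟩)
        · exact Or.inl h
        · exact Or.inr ⟨s, Or.inl rfl, h⟩
        · exact Or.inr ⟨sp, Or.inr hsp, hm⟩
      · rintro (h | ⟨sp, (rfl | hsp), hm⟩)
        · exact Or.inl (Or.inl h)
        · exact Or.inl (Or.inr hm)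
        · exact Or.inr ⟨sp, hsp, hm⟩

-- membership in B's intersection fold
theorem mem_foldl_inter (l : List (List Int)) (c : List Int) (e : Int) :
    e ∈ l.foldl (fun c sp => PySem.Set.inter c sp) c ↔ e ∈ c ∧ ∀ sp ∈ l, e ∈ sp := by
  induction l generalizing c with
  | nil => simp
  | cons s t ih =>
      simp only [List.foldl_cons, ih, PySem.Set.mem_inter, List.mem_cons]
      constructor
      · rintro ⟨⟨hc, hs⟩, hall⟩
        exact ⟨hc, fun sp h => h.elim (fun h => h ▸ hs) (hall sp)⟩
      · rintro ⟨hc, hall⟩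
        exact ⟨⟨hc, hall s (Or.inl rfl)⟩, fun sp h => hall sp (Or.inr h)⟩

theorem both_iff (spans_info : List (List Int)) :
    exist_overall_info spans_info = exist_overall_info_alt spans_info := by
  rw [Bool.eq_iff_iff]
  cases spans_info with
  | nil => simp [exist_overall_info, exist_overall_info_alt]
  | cons s rest =>
      simp only [exist_overall_info, exist_overall_info_alt, List.any_eq_true,
        List.all_eq_true, decide_eq_true_eq, Bool.not_eq_eq_eq_not, Bool.not_true,
        List.isEmpty_eq_false_iff, ne_eq]
      constructor
      · rintro ⟨e, _, hall⟩ hnil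
        have he : e ∈ rest.foldl (fun c sp => PySem.Set.inter c sp) (PySem.Set.ofList s) :=
          (mem_foldl_inter rest _ e).mpr
            ⟨(PySem.Set.mem_ofList _ _).mpr (hall s (List.mem_cons_self)),
             fun sp h => hall sp (List.mem_cons_of_mem _ h)⟩
        rw [hnil] at he
        exact absurd he (List.not_mem_nil)
      · intro hne
        obtain ⟨e, he⟩ := List.exists_mem_of_ne_nil _ hne
        rw [mem_foldl_inter] at he
        obtain ⟨hc, hall⟩ := he
        have hs : e ∈ s := (PySem.Set.mem_ofList _ _).mp hc
        refine ⟨e, ?_, ?_⟩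
        · rw [mem_foldl_update]; exact Or.inr ⟨s, List.mem_cons_self, hs⟩
        · intro sp h
          rcases List.mem_cons.mp h with rfl | h
          · exact hs
          · exact hall sp h

-- ===== VERDICT (by name: the statement is the Claim_ definition above) =====
theorem exist_overall_info_spec : Claim_equal_exist_overall_info := by
  intro spans_info _
  unfold Spec_exist_overall_info
  exact both_iff spans_info
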